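-- pv_equiv track=rewrite | github.com/stbrumme/leetcode | 2575.py | divisibilityArray
-- ===== SOURCE A (Python) =====
-- from typing import List
--
-- def divisibilityArray(word: str, m: int) -> List[int]:
--     have = 0
--     for c in word:
--         have *= 10
--         have += int(c)
--
--         have %= m
--         if have == 0:
--             yield 1
--         else:
--             yield 0
-- ===== SOURCE B (Python) =====
-- def divisibilityArray(word: str, m: int):
--     for i in range(len(word)):
--         v = 0
--         for c in word[: i + 1]:
--             v = v * 10 + int(c)
--         if v % m == 0:
--             yield 1
--         else:
--             yield 0
-- ===== Notes on version B (the rewrite author's own statement) =====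
-- stated objective: alternative
-- what changed: B recomputes each prefix's integer value from scratch for every index (an indexed map over nested rescans) instead of A's single pass carrying a running remainder.
import Mathlib
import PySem

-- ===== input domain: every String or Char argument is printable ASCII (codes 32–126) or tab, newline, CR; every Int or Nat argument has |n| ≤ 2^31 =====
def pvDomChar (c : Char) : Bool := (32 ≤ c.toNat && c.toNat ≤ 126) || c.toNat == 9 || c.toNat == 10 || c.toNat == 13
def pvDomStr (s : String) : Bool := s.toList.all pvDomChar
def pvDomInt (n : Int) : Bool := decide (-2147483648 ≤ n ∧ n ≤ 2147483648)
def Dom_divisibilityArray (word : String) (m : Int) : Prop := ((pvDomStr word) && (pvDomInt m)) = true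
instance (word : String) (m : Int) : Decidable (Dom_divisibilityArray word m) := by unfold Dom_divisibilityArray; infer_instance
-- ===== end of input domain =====

-- B recomputes each prefix value from scratch per index (nested rescans) instead of A's one-pass running remainder; both are generators in Python, compared by the list of yielded values.

-- int(c) for a single character (exact: ofChars? is int(); Pre_ keeps every character a digit, so the .getD 0 default is never taken)
def pyIntDigit (c : Char) : Int := (PySem.Int.ofChars? [c]).getD 0

-- ===== PORT A =====
def divisibilityArray (word : String) (m : Int) : List Int :=
  (word.toList.foldl
    (fun (st : List Int × Int) c =>
      let h1 := st.2 * 10 + pyIntDigit c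
      let h2 := PySem.Int.mod h1 m
      (st.1 ++ [if h2 == 0 then (1 : Int) else 0], h2))
    ([], 0)).1

-- ===== PORT B =====
-- inner loop of Source B: v = 0; for c in prefix: v = v*10 + int(c)
def prefVal (cs : List Char) : Int := cs.foldl (fun v c => v * 10 + pyIntDigit c) 0

def divisibilityArray_alt (word : String) (m : Int) : List Int :=
  (PySem.List.pyRange 0 (PySem.Str.len word) 1).map
    (fun i =>
      let v := prefVal (PySem.Chars.slice word.toList none (some (i + 1)))
      if PySem.Int.mod v m == 0 then (1 : Int) else 0)

-- ===== PRECONDITION & SPEC =====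
-- Pre_ excludes exactly the inputs where the Python A raises: a non-digit character (ValueError
-- from int(c)) or m = 0 with a nonempty word (ZeroDivisionError at the first element).
def Pre_divisibilityArray (word : String) (m : Int) : Prop :=
  word.toList.all PySem.Chars.isdigit = true ∧ (word.toList = [] ∨ m ≠ 0)
instance (word : String) (m : Int) : Decidable (Pre_divisibilityArray word m) := by unfold Pre_divisibilityArray; infer_instance

def pvWitness_divisibilityArray : String × Int := ("190", 19)

def Spec_divisibilityArray (word : String) (m : Int) (out : List Int) : Prop := out = divisibilityArray_alt word m
instance (word : String) (m : Int) (out : List Int) : Decidable (Spec_divisibilityArray word m out) := by unfold Spec_divisibilityArray; infer_instance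

-- ===== CLAIM (what is proved, stated in full; the proofs are below) =====
def Claim_equal_divisibilityArray : Prop := ∀ (word : String) (m : Int), Dom_divisibilityArray word m → Pre_divisibilityArray word m → Spec_divisibilityArray word m (divisibilityArray word m)

-- ===== LEMMAS AND PROOFS =====

-- Python's % is Int.fmod; reducing the left operand mod m first changes nothing (any m, incl. 0).
lemma fmod_step (a d m : Int) :
    PySem.Int.mod (PySem.Int.mod a m * 10 + d) m = PySem.Int.mod (a * 10 + d) m := by
  simp only [PySem.Int.mod]
  have h : a.fmod m * 10 + d = (a * 10 + d) + m * (-(10 * a.fdiv m)) := by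
    rw [Int.fmod_def]; ring
  rw [h, Int.add_mul_fmod_self_left]

lemma prefVal_append (cs : List Char) (c : Char) :
    prefVal (cs ++ [c]) = prefVal cs * 10 + pyIntDigit c := by
  simp [prefVal, List.foldl_append]

lemma loopA (m : Int) (cs : List Char) :
    cs.foldl
      (fun (st : List Int × Int) c =>
        let h1 := st.2 * 10 + pyIntDigit c
        let h2 := PySem.Int.mod h1 m
        (st.1 ++ [if h2 == 0 then (1 : Int) else 0], h2))
      ([], 0)
    = ((List.range cs.length).map
        (fun j => if PySem.Int.mod (prefVal (cs.take (j + 1))) m == 0 then (1 : Int) else 0),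
       PySem.Int.mod (prefVal cs) m) := by
  induction cs using List.reverseRecOn with
  | nil => simp [prefVal, PySem.Int.mod, Int.zero_fmod]
  | append_singleton cs c ih =>
      rw [List.foldl_append, ih]
      simp only [List.foldl_cons, List.foldl_nil]
      have hsnd : PySem.Int.mod (PySem.Int.mod (prefVal cs) m * 10 + pyIntDigit c) m
          = PySem.Int.mod (prefVal (cs ++ [c])) m := by
        rw [fmod_step, prefVal_append]
      refine Prod.ext ?_ hsnd
      simp only [List.length_append, List.length_cons, List.length_nil]
      rw [List.range_succ, List.map_append]
      congr 1
      · apply List.map_congr_left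
        intro j hj
        have hj' : j + 1 ≤ cs.length := List.mem_range.mp hj
        rw [List.take_append_of_le_length hj']
      · simp only [List.map_cons, List.map_nil]
        rw [List.take_of_length_le (by simp), hsnd]

lemma altEq (word : String) (m : Int) :
    divisibilityArray_alt word m
    = (List.range word.toList.length).map
        (fun j => if PySem.Int.mod (prefVal (word.toList.take (j + 1))) m == 0 then (1 : Int) else 0) := by
  unfold divisibilityArray_alt
  rw [show PySem.Str.len word = (word.toList.length : Int) by simp [PySem.Str.len_eq]]
  rw [PySem.List.pyRange_one]
  simp only [Int.sub_zero, Int.toNat_natCast, List.map_map]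
  apply List.map_congr_left
  intro j hj
  have hsl : PySem.List.slice word.toList none (some ((j : Int) + 1)) = word.toList.take (j + 1) := by
    rw [show ((j : Int) + 1) = ((j + 1 : Nat) : Int) by push_cast; ring,
        PySem.List.slice_to_natCast]
  simp [hsl]

-- ===== VERDICT (by name: the statement is the Claim_ definition above) =====
theorem divisibilityArray_spec : Claim_equal_divisibilityArray := by
  intro word m _ _
  unfold Spec_divisibilityArray divisibilityArray
  rw [loopA, altEq]
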